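-- pv_equiv track=rewrite | github.com/emil817/auto_differentiation | main.py | find_all_vars
-- ===== SOURCE A (Python) =====
-- def find_all_vars(formula: str) -> list[str]:
--     """
--     Функция для всех переменных в выражении
--     """
--
--     vars = []
--
--     i = 0
--     while i < len(formula):
--         if formula[i] == '\\':
--             i += 1
--             while i < len(formula) and formula[i].isalpha():
--                 i += 1
--             continue
--
--         if formula[i].isalpha():
--             if formula[i].lower() == 'e':
--                 i += 1
--                 continue
--
--             if formula[i] not in vars:
--                 vars.append(formula[i])
--         i += 1
--
--     return vars
-- ===== SOURCE B (Python) =====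
-- import re
--
-- def find_all_vars(formula: str) -> list[str]:
--     # Strip every LaTeX command (a backslash and its run of letters), then
--     # collect first occurrences of letters other than 'e'/'E'.
--     cleaned = re.sub(r'\\[^\W\d_]*', '', formula)
--     found = []
--     for ch in cleaned:
--         if ch.isalpha() and ch.lower() != 'e' and ch not in found:
--             found.append(ch)
--     return found
-- ===== Notes on version B (the rewrite author's own statement) =====
-- stated objective: simpler
-- what changed: Replaced the interleaved index scan (manual command skipping inside the collection loop) with a two-pass strip-then-collect: one regex substitution deletes every backslash command, then a single filtering pass collects first-seen letters other than e/E.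
import Mathlib
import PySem

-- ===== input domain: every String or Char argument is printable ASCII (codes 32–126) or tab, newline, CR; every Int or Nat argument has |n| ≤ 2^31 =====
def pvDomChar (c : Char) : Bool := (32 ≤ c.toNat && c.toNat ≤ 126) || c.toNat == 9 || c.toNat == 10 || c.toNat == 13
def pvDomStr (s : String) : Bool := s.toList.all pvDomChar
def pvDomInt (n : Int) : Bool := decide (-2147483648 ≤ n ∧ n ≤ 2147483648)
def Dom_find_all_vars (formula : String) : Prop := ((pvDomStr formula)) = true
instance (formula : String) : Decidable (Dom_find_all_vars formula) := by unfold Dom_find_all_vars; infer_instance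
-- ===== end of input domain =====

-- B replaces A's interleaved index scan with a two-pass strip-then-collect (simpler decomposition, same cost).


-- ===== PORT A =====
-- A's while-loop over the index, as structural recursion over the remaining characters;
-- the inner `while … isalpha` is the dropWhile of the alphabetic run.
def findAllVarsGoA : List Char → List String → List String
  | [], vars => vars
  | c :: rest, vars =>
    if c = '\\' then findAllVarsGoA (rest.dropWhile PySem.Chars.isalpha) vars
    else if PySem.Chars.isalpha c then
      if PySem.Chars.lowerChar c = 'e' then findAllVarsGoA rest vars
      else if String.ofList [c] ∈ vars then findAllVarsGoA rest vars
      else findAllVarsGoA rest (vars ++ [String.ofList [c]])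
    else findAllVarsGoA rest vars
termination_by l _ => l.length
decreasing_by
  · have := List.length_dropWhile_le PySem.Chars.isalpha rest; simp; omega
  all_goals simp

def find_all_vars (formula : String) : List String :=
  findAllVarsGoA formula.toList []

-- ===== PORT B =====
-- pass 1 of Source B: delete each backslash together with its run of letters
def findAllVarsClean : List Char → List Char
  | [] => []
  | c :: rest =>
    if c = '\\' then findAllVarsClean (rest.dropWhile PySem.Chars.isalpha)
    else c :: findAllVarsClean rest
termination_by l => l.length
decreasing_by
  · have := List.length_dropWhile_le PySem.Chars.isalpha rest; simp; omega
  all_goals simp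

-- pass 2 of Source B: the filtering fold collecting first-seen letters other than e/E
def findAllVarsCollect (vars : List String) (c : Char) : List String :=
  if PySem.Chars.isalpha c ∧ PySem.Chars.lowerChar c ≠ 'e' ∧ String.ofList [c] ∉ vars
  then vars ++ [String.ofList [c]] else vars

def find_all_vars_alt (formula : String) : List String :=
  (findAllVarsClean formula.toList).foldl findAllVarsCollect []

-- ===== PRECONDITION & SPEC =====
def Spec_find_all_vars (formula : String) (out : List String) : Prop := out = find_all_vars_alt formula
instance (formula : String) (out : List String) : Decidable (Spec_find_all_vars formula out) := by unfold Spec_find_all_vars; infer_instance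

-- ===== CLAIM (what is proved, stated in full; the proofs are below) =====
def Claim_equal_find_all_vars : Prop := ∀ (formula : String), Dom_find_all_vars formula → Spec_find_all_vars formula (find_all_vars formula)

-- ===== LEMMAS AND PROOFS =====
theorem findAllVars_key : ∀ (l : List Char) (vars : List String),
    findAllVarsGoA l vars = (findAllVarsClean l).foldl findAllVarsCollect vars := by
  intro l vars
  induction l, vars using findAllVarsGoA.induct <;>
    simp_all [findAllVarsGoA, findAllVarsClean, findAllVarsCollect]

-- ===== VERDICT (by name: the statement is the Claim_ definition above) =====
theorem find_all_vars_spec : Claim_equal_find_all_vars := by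
  intro formula _
  unfold Spec_find_all_vars find_all_vars find_all_vars_alt
  exact findAllVars_key _ _
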